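-- pv_equiv track=rewrite | github.com/hexiaoweiff8/MyLeetCode | code/LCP40.py | maxmiumScore
-- ===== SOURCE A (Python) =====
-- def maxmiumScore(cards, cnt):
--     """
--     :type cards: List[int]
--     :type cnt: int
--     :rtype: int
--     """
--     cards.sort(reverse=True)
--     s = sum(cards[:cnt])
--     if s % 2 == 0:
--         return s
--
--     def replace_sum(x):
--         for v in cards[cnt:]:
--             if v % 2 != x % 2:  # 找到一个最大的奇偶性和 x 不同的数
--                 return s - x + v  # 用 v 替换 s
--         return 0
--     x = cards[cnt - 1]
--     ret = replace_sum(x)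
--     for v in cards[cnt - 1:: -1]:
--         if v % 2 != x % 2:
--             ret = max(ret, replace_sum(v))
--             break
--     return ret
-- ===== SOURCE B (Python) =====
-- def maxmiumScore(cards, cnt):
--     cards.sort(reverse=True)
--     s = sum(cards[:cnt])
--     if s % 2 == 0:
--         return s
--     odds = [v for v in cards if v % 2 != 0]
--     evens = [v for v in cards if v % 2 == 0]
--     po = [0]
--     for v in odds:
--         po.append(po[-1] + v)
--     pe = [0]
--     for v in evens:
--         pe.append(pe[-1] + v)
--     best = 0
--     for k in range(0, len(odds) + 1, 2):
--         if 0 <= cnt - k <= len(evens):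
--             best = max(best, po[k] + pe[cnt - k])
--     return best
-- ===== Notes on version B (the rewrite author's own statement) =====
-- stated objective: alternative
-- what changed: A's greedy search (pick the smallest selected card of each parity and rescan the suffix for the largest opposite-parity replacement) is replaced by a parity split with prefix sums that enumerates every even count k of odd cards and maximizes po[k]+pe[cnt-k].
-- intended difference: On inputs (necessarily containing negative cards) whose sorted top-cnt sum is odd, where every selected card still has an opposite-parity replacement among the unselected ones yet every such swap yields a negative total, A returns that negative total while B returns 0, the problem's return-0 convention for 'no worthwhile even score' (the problem specifies positive cards, so this corner is unspecified and B's fallback is the intended choice). — e.g. on maxmiumScore([-1, -2], 1): A returns -2, B returns 0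
-- outside the precondition, e.g. on maxmiumScore([3, 2], -1): A returns 2, B returns 0
import Mathlib
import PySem

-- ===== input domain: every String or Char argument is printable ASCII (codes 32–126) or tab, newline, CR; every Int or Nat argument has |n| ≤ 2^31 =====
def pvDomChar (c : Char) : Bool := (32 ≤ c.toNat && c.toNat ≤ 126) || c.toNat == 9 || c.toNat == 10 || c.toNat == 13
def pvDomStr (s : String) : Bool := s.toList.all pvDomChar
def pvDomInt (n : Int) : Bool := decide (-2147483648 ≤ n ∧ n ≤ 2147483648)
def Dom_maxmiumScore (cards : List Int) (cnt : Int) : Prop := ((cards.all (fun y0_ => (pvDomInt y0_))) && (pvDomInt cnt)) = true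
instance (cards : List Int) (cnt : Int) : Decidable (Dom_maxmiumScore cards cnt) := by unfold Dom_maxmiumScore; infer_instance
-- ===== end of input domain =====

-- B replaces A's greedy extremal-swap search by a parity split with prefix sums, maximizing over
-- every even number of odd cards taken (alternative algorithm, same O(n log n) cost); both Pythons
-- sort `cards` in place (same side effect), the equivalence is about the return value.

-- ===== PORT A =====
-- `replace_sum(x)`: scan cards[cnt:] for the first value of the other parity
def pvReplaceSum (s x : Int) : List Int → Int
  | [] => 0
  | v :: t => if PySem.Int.mod v 2 ≠ PySem.Int.mod x 2 then s - x + v else pvReplaceSum s x t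

-- the final `for v in cards[cnt-1::-1]: … break` loop
def pvSwapLoop (s x ret : Int) (suffix : List Int) : List Int → Int
  | [] => ret
  | v :: t => if PySem.Int.mod v 2 ≠ PySem.Int.mod x 2 then max ret (pvReplaceSum s v suffix)
              else pvSwapLoop s x ret suffix t

def maxmiumScore (cards : List Int) (cnt : Int) : Int :=
  let L := PySem.List.sorted cards (fun x => x) true
  let s := (PySem.List.slice L none (some cnt)).sum
  if PySem.Int.mod s 2 = 0 then s
  else
    match PySem.List.pyGet? L (cnt - 1) with
    | none => 0  -- IndexError in Python; excluded by Pre_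
    | some x =>
      let suffix := PySem.List.slice L (some cnt) none
      let ret := pvReplaceSum s x suffix
      match PySem.List.slice? L (some (cnt - 1)) none (-1) with
      | none => 0  -- unreachable: step = -1 ≠ 0
      | some rev => pvSwapLoop s x ret suffix rev

-- ===== PORT B =====
-- `v % 2 != 0` / `v % 2 == 0`
def pvIsOdd (v : Int) : Bool := decide (PySem.Int.mod v 2 ≠ 0)
def pvIsEven (v : Int) : Bool := decide (PySem.Int.mod v 2 = 0)

-- `p = [0]; for v in l: p.append(p[-1] + v)` — the list grown after the initial 0
def pvPrefixLoop (acc : Int) : List Int → List Int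
  | [] => []
  | v :: t => (acc + v) :: pvPrefixLoop (acc + v) t

def maxmiumScore_alt (cards : List Int) (cnt : Int) : Int :=
  let L := PySem.List.sorted cards (fun x => x) true
  let s := (PySem.List.slice L none (some cnt)).sum
  if PySem.Int.mod s 2 = 0 then s
  else
    let odds := L.filter pvIsOdd
    let evens := L.filter pvIsEven
    let po := 0 :: pvPrefixLoop 0 odds
    let pe := 0 :: pvPrefixLoop 0 evens
    (PySem.List.pyRange 0 ((odds.length : Int) + 1) 2).foldl
      (fun best k =>
        if 0 ≤ cnt - k ∧ cnt - k ≤ (evens.length : Int) then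
          -- po[k], pe[cnt-k]; the indices are always in range here (k ≤ len(odds), 0 ≤ cnt-k ≤ len(evens))
          max best ((PySem.List.pyGet? po k).getD 0 + (PySem.List.pyGet? pe (cnt - k)).getD 0)
        else best) 0

-- ===== PRECONDITION & SPEC =====
-- Pre_ excludes cnt > len(cards) with odd total, where A raises IndexError at cards[cnt-1], and
-- negative cnt whose sorted-prefix sum is odd, where A's value rests on Python's accidental
-- negative-index wraparound (on a negative cnt with EVEN prefix sum both return that sum, so it stays in).
def Pre_maxmiumScore (cards : List Int) (cnt : Int) : Prop :=
  (cnt ≤ (cards.length : Int) ∨ PySem.Int.mod cards.sum 2 = 0) ∧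
  (0 ≤ cnt ∨ PySem.Int.mod (PySem.List.slice (PySem.List.sorted cards (fun x => x) true)
    none (some cnt)).sum 2 = 0)
instance (cards : List Int) (cnt : Int) : Decidable (Pre_maxmiumScore cards cnt) := by
  unfold Pre_maxmiumScore; infer_instance

def pvWitness_maxmiumScore : List Int × Int := ([3, 1, 2], 2)

-- On inputs (necessarily containing negative cards) whose sorted top-cnt sum is odd, where every
-- selected card has an opposite-parity replacement left over yet every such swap yields a negative
-- total, A returns that negative total while B returns 0, the problem's return-0 convention for
-- "no worthwhile even score" (the problem specifies positive cards, so this corner is unspecified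
-- and B's fallback is the intended choice).
def D_maxmiumScore (cards : List Int) (cnt : Int) : Prop :=
  let L := PySem.List.sorted cards (fun x => x) true
  let P := L.take cnt.toNat
  let S := L.drop cnt.toNat
  PySem.Int.mod P.sum 2 = 1 ∧
  (∀ p ∈ P, ∃ q ∈ S, PySem.Int.mod p 2 ≠ PySem.Int.mod q 2) ∧
  (∀ p ∈ P, ∀ q ∈ S, PySem.Int.mod p 2 ≠ PySem.Int.mod q 2 → P.sum - p + q < 0)
instance (cards : List Int) (cnt : Int) : Decidable (D_maxmiumScore cards cnt) := by
  unfold D_maxmiumScore; infer_instance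

def Spec_maxmiumScore (cards : List Int) (cnt : Int) (out : Int) : Prop :=
  ¬ D_maxmiumScore cards cnt → out = maxmiumScore_alt cards cnt
instance (cards : List Int) (cnt : Int) (out : Int) : Decidable (Spec_maxmiumScore cards cnt out) := by
  unfold Spec_maxmiumScore; infer_instance

def pvDiffWitness_maxmiumScore : List Int × Int := ([-1, -2], 1)
def pvDiffWitnessOut_maxmiumScore : Int × Int := (-2, 0)

-- ===== CLAIM (what is proved, stated in full; the proofs are below) =====
def Claim_unchanged_maxmiumScore : Prop := ∀ (cards : List Int) (cnt : Int), Dom_maxmiumScore cards cnt → Pre_maxmiumScore cards cnt → Spec_maxmiumScore cards cnt (maxmiumScore cards cnt)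
def Claim_changed_maxmiumScore : Prop := Dom_maxmiumScore (pvDiffWitness_maxmiumScore.1) (pvDiffWitness_maxmiumScore.2) ∧ Pre_maxmiumScore (pvDiffWitness_maxmiumScore.1) (pvDiffWitness_maxmiumScore.2) ∧ D_maxmiumScore (pvDiffWitness_maxmiumScore.1) (pvDiffWitness_maxmiumScore.2) ∧ maxmiumScore (pvDiffWitness_maxmiumScore.1) (pvDiffWitness_maxmiumScore.2) = pvDiffWitnessOut_maxmiumScore.1 ∧ maxmiumScore_alt (pvDiffWitness_maxmiumScore.1) (pvDiffWitness_maxmiumScore.2) = pvDiffWitnessOut_maxmiumScore.2 ∧ pvDiffWitnessOut_maxmiumScore.1 ≠ pvDiffWitnessOut_maxmiumScore.2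
def Claim_exact_maxmiumScore : Prop := ∀ (cards : List Int) (cnt : Int), Dom_maxmiumScore cards cnt → Pre_maxmiumScore cards cnt → D_maxmiumScore cards cnt → maxmiumScore cards cnt ≠ maxmiumScore_alt cards cnt

-- ===== LEMMAS AND PROOFS =====

-- ---- basic parity facts ----
lemma pvMod2 (v : Int) : PySem.Int.mod v 2 = 0 ∨ PySem.Int.mod v 2 = 1 :=
  PySem.Int.mod_two_eq v

lemma pvModEmod (v : Int) : PySem.Int.mod v 2 = v % 2 :=
  PySem.Int.mod_eq_emod_of_pos (by norm_num)

lemma pvOddIff (v : Int) : pvIsOdd v = true ↔ v % 2 = 1 := by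
  have h := pvMod2 v
  simp only [pvIsOdd, decide_eq_true_eq, pvModEmod] at *
  omega

lemma pvEvenIff (v : Int) : pvIsEven v = true ↔ v % 2 = 0 := by
  simp only [pvIsEven, decide_eq_true_eq, pvModEmod]

lemma pvEvenNotOdd (v : Int) : pvIsEven v = !pvIsOdd v := by
  rcases pvMod2 v with h | h <;> simp only [pvIsEven, pvIsOdd, h] <;> decide

lemma pvPredOdd (x : Int) (hx : PySem.Int.mod x 2 = 1) :
    (fun v => decide (PySem.Int.mod v 2 ≠ PySem.Int.mod x 2)) = pvIsEven := by
  funext v; rcases pvMod2 v with h | h <;> simp only [pvIsEven, h, hx] <;> decide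

lemma pvPredEven (x : Int) (hx : PySem.Int.mod x 2 = 0) :
    (fun v => decide (PySem.Int.mod v 2 ≠ PySem.Int.mod x 2)) = pvIsOdd := by
  funext v; rcases pvMod2 v with h | h <;> simp only [pvIsOdd, h, hx] <;> decide

lemma pvSumPartition (l : List Int) :
    l.sum = (l.filter pvIsOdd).sum + (l.filter pvIsEven).sum := by
  induction l with
  | nil => simp
  | cons v t ih =>
    rcases hb : pvIsOdd v with _ | _ <;>
      have he := pvEvenNotOdd v <;> rw [hb] at he <;>
      simp [List.filter_cons, hb, he, ih] <;> ring

lemma pvLenPartition (l : List Int) :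
    l.length = (l.filter pvIsOdd).length + (l.filter pvIsEven).length := by
  induction l with
  | nil => simp
  | cons v t ih =>
    rcases hb : pvIsOdd v with _ | _ <;>
      have he := pvEvenNotOdd v <;> rw [hb] at he <;>
      simp [List.filter_cons, hb, he, ih] <;> omega

lemma pvOddSumParity (l : List Int) (h : ∀ v ∈ l, pvIsOdd v = true) :
    l.sum % 2 = (l.length : Int) % 2 := by
  induction l with
  | nil => simp
  | cons v t ih =>
    have hv : v % 2 = 1 := (pvOddIff v).mp (h v (by simp))
    have ht := ih (fun w hw => h w (by simp [hw]))
    simp only [List.sum_cons, List.length_cons]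
    push_cast
    omega

lemma pvEvenSumParity (l : List Int) (h : ∀ v ∈ l, pvIsEven v = true) :
    l.sum % 2 = 0 := by
  induction l with
  | nil => simp
  | cons v t ih =>
    have hv : v % 2 = 0 := (pvEvenIff v).mp (h v (by simp))
    have ht := ih (fun w hw => h w (by simp [hw]))
    simp only [List.sum_cons]
    omega

-- ---- A-side reductions ----
lemma pvReplaceSum_eq_find (s x : Int) (l : List Int) :
    pvReplaceSum s x l =
      match l.find? (fun v => decide (PySem.Int.mod v 2 ≠ PySem.Int.mod x 2)) with
      | some v => s - x + v
      | none => 0 := by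
  induction l with
  | nil => rfl
  | cons v t ih =>
    cases hd : decide (PySem.Int.mod v 2 ≠ PySem.Int.mod x 2) with
    | true =>
      have h := of_decide_eq_true hd
      simp only [pvReplaceSum, List.find?_cons, hd, if_pos h]
    | false =>
      have h := of_decide_eq_false hd
      simp only [pvReplaceSum, List.find?_cons, hd, if_neg h]
      exact ih

lemma pvSwapLoop_eq_find (s x ret : Int) (suffix l : List Int) :
    pvSwapLoop s x ret suffix l =
      match l.find? (fun v => decide (PySem.Int.mod v 2 ≠ PySem.Int.mod x 2)) with
      | some w => max ret (pvReplaceSum s w suffix)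
      | none => ret := by
  induction l with
  | nil => rfl
  | cons v t ih =>
    cases hd : decide (PySem.Int.mod v 2 ≠ PySem.Int.mod x 2) with
    | true =>
      have h := of_decide_eq_true hd
      simp only [pvSwapLoop, List.find?_cons, hd, if_pos h]
    | false =>
      have h := of_decide_eq_false hd
      simp only [pvSwapLoop, List.find?_cons, hd, if_neg h]
      exact ih

-- xs[m::-1] for an in-range nonnegative m is the reversed (m+1)-prefix
lemma pvSliceRev (xs : List Int) (m : Nat) (hm : m < xs.length) :
    PySem.List.slice? xs (some (m : Int)) none (-1) = some ((xs.take (m + 1)).reverse) := by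
  have hs : PySem.List.sliceIndices xs.length (some (m : Int)) none (-1) = ((m : Int), -1, -1) := by
    simp only [PySem.List.sliceIndices]
    norm_num
    omega
  rw [PySem.List.slice?]
  rw [if_neg (by norm_num), hs]
  norm_num
  rw [if_pos (show (-1:Int) < (m:Int) by omega)]
  have hget : ∀ x ∈ List.range (m+1), xs[((m:Int) + -(x:Int)).toNat]? = some (xs.getD (m - x) 0) := by
    intro x hx
    have hx' : x ≤ m := by simpa [Nat.lt_succ_iff] using List.mem_range.mp hx
    have h2 : ((m:Int) + -(x:Int)).toNat = m - x := by omega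
    rw [h2, List.getElem?_eq_getElem (by omega)]
    simp [List.getD_eq_getElem?_getD, List.getElem?_eq_getElem (show m - x < xs.length by omega)]
  rw [List.filterMap_congr hget]
  rw [show (fun x => some (xs.getD (m - x) 0)) = (some ∘ fun x => xs.getD (m - x) 0) from rfl,
    List.filterMap_eq_map]
  apply List.ext_getElem
  · simp; omega
  · intro i h1 h2
    simp only [List.getElem_map, List.getElem_range, List.getElem_reverse, List.getElem_take]
    have h3 : i ≤ m := by simp at h1; omega
    rw [List.getD_eq_getElem?_getD, List.getElem?_eq_getElem (by omega)]
    simp only [Option.getD_some]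
    congr 1
    simp at h2 ⊢
    omega

-- find? through filter / reverse
lemma pvFindFilter (p : Int → Bool) (l : List Int) : l.find? p = (l.filter p).head? :=
  (List.head?_filter).symm

lemma pvFindRev (p : Int → Bool) (l : List Int) : l.reverse.find? p = (l.filter p).getLast? := by
  rw [pvFindFilter, List.filter_reverse, List.head?_reverse]

-- ---- the two swap candidates and A's value ----
def pvT1 (P S : List Int) (s : Int) : Int :=
  match (P.filter pvIsOdd).getLast?, (S.filter pvIsEven).head? with
  | some o, some e => s - o + e
  | _, _ => 0

def pvT2 (P S : List Int) (s : Int) : Int :=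
  match (P.filter pvIsEven).getLast?, (S.filter pvIsOdd).head? with
  | some y, some o => s - y + o
  | _, _ => 0

def pvL (cards : List Int) : List Int := PySem.List.sorted cards (fun x => x) true

def pvSVal (cards : List Int) (cnt : Int) : Int := ((pvL cards).take cnt.toNat).sum

def pvOddVal (cards : List Int) (cnt : Int) : Int :=
  let P := (pvL cards).take cnt.toNat
  let S := (pvL cards).drop cnt.toNat
  if P.filter pvIsEven = [] then pvT1 P S P.sum else max (pvT1 P S P.sum) (pvT2 P S P.sum)

-- A's tail (swap search) equals the best of the two parity-swap candidates
lemma pvAval (P S : List Int) (s : Int) (hPne : P ≠ []) (hPO : P.filter pvIsOdd ≠ []) :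
    pvSwapLoop s (P.getLast hPne) (pvReplaceSum s (P.getLast hPne) S) S P.reverse =
      if P.filter pvIsEven = [] then pvT1 P S s else max (pvT1 P S s) (pvT2 P S s) := by
  set x := P.getLast hPne with hxdef
  rcases pvMod2 x with hx0 | hx1
  · -- x even
    have hxb : pvIsEven x = true := by simp only [pvIsEven, hx0]; decide
    have hgl : (P.filter pvIsEven).getLast? = some x := by
      conv_lhs => rw [← List.dropLast_append_getLast hPne, ← hxdef]
      rw [List.filter_append]
      have hone : List.filter pvIsEven [x] = [x] := by simp [List.filter_cons, hxb]
      rw [hone, List.getLast?_concat]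
    obtain ⟨v, hv⟩ : ∃ v, (P.filter pvIsOdd).getLast? = some v :=
      Option.isSome_iff_exists.mp (List.getLast?_isSome.mpr hPO)
    have hvodd : PySem.Int.mod v 2 = 1 := by
      have hm := List.of_mem_filter (List.mem_of_getLast? hv)
      simp only [pvIsOdd, decide_eq_true_eq] at hm
      rcases pvMod2 v with h | h
      · exact absurd h hm
      · exact h
    have hPEne : P.filter pvIsEven ≠ [] := by
      refine List.ne_nil_of_mem (a := x) (List.mem_filter.mpr ⟨?_, hxb⟩)
      exact hxdef ▸ List.getLast_mem hPne
    rw [if_neg hPEne]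
    rw [pvSwapLoop_eq_find, pvReplaceSum_eq_find s x S, pvPredEven x hx0,
      pvFindFilter pvIsOdd S, pvFindRev pvIsOdd P, hv]
    dsimp only
    rw [pvReplaceSum_eq_find s v S, pvPredOdd v hvodd, pvFindFilter pvIsEven S]
    cases hse : (S.filter pvIsEven).head? <;> cases hso : (S.filter pvIsOdd).head? <;>
      simp [pvT1, pvT2, hgl, hv, hse, hso, max_comm]
  · -- x odd
    have hxb : pvIsOdd x = true := by simp only [pvIsOdd, hx1]; decide
    have hgl : (P.filter pvIsOdd).getLast? = some x := by
      conv_lhs => rw [← List.dropLast_append_getLast hPne, ← hxdef]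
      rw [List.filter_append]
      have hone : List.filter pvIsOdd [x] = [x] := by simp [List.filter_cons, hxb]
      rw [hone, List.getLast?_concat]
    rw [pvSwapLoop_eq_find, pvReplaceSum_eq_find s x S, pvPredOdd x hx1,
      pvFindFilter pvIsEven S, pvFindRev pvIsEven P]
    cases hPEl : (P.filter pvIsEven).getLast? with
    | none =>
      rw [if_pos (List.getLast?_eq_none_iff.mp hPEl)]
      cases hse : (S.filter pvIsEven).head? <;> simp [pvT1, hgl, hse]
    | some y =>
      have hPEne : P.filter pvIsEven ≠ [] := by
        intro h; rw [h] at hPEl; simp at hPEl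
      rw [if_neg hPEne]
      have hy0 : PySem.Int.mod y 2 = 0 := by
        have hm := List.of_mem_filter (List.mem_of_getLast? hPEl)
        simpa [pvIsEven] using hm
      dsimp only
      rw [pvReplaceSum_eq_find s y S, pvPredEven y hy0, pvFindFilter pvIsOdd S]
      cases hse : (S.filter pvIsEven).head? <;> cases hso : (S.filter pvIsOdd).head? <;>
        simp [pvT1, pvT2, hgl, hPEl, hse, hso]

-- ---- B-side: prefix sums, range, fold ----
lemma pvPrefixGet (l : List Int) : ∀ (j : Nat) (acc : Int), j ≤ l.length →
    (acc :: pvPrefixLoop acc l)[j]? = some (acc + (l.take j).sum) := by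
  induction l with
  | nil =>
    intro j acc hj
    have hj0 : j = 0 := by simpa using hj
    subst hj0; simp [pvPrefixLoop]
  | cons v t ih =>
    intro j acc hj
    cases j with
    | zero => simp
    | succ j =>
      have := ih j (acc + v) (by simpa using hj)
      simp only [pvPrefixLoop, List.getElem?_cons_succ] at *
      rw [this]
      simp [List.take_succ_cons]
      ring

lemma pvFoldGeInit (cond : Int → Prop) [DecidablePred cond] (val : Int → Int)
    (l : List Int) : ∀ (init : Int),
    init ≤ l.foldl (fun best kk => if cond kk then max best (val kk) else best) init := by
  induction l with
  | nil => intro init; simp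
  | cons x t ih =>
    intro init
    refine le_trans ?_ (ih _)
    dsimp only
    split_ifs <;> simp

lemma pvFoldGeElem (cond : Int → Prop) [DecidablePred cond] (val : Int → Int)
    (l : List Int) : ∀ (init kk : Int), kk ∈ l → cond kk →
    val kk ≤ l.foldl (fun best k' => if cond k' then max best (val k') else best) init := by
  induction l with
  | nil => intro _ _ h; simp at h
  | cons x t ih =>
    intro init kk hmem hc
    rcases List.mem_cons.mp hmem with rfl | hmem'
    · refine le_trans ?_ (pvFoldGeInit cond val t _)
      simp [if_pos hc]
    · exact ih _ _ hmem' hc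

lemma pvFoldLe (cond : Int → Prop) [DecidablePred cond] (val : Int → Int)
    (l : List Int) : ∀ (init M : Int), init ≤ M → (∀ kk ∈ l, cond kk → val kk ≤ M) →
    l.foldl (fun best k' => if cond k' then max best (val k') else best) init ≤ M := by
  induction l with
  | nil => intro init M h _; simpa
  | cons x t ih =>
    intro init M hinit hall
    refine ih _ _ ?_ (fun kk hk hc => hall kk (by simp [hk]) hc)
    dsimp only
    split_ifs with hc
    · exact max_le hinit (hall x (by simp) hc)
    · exact hinit

-- f(j) = sum of the j largest odds + the (k-j) largest evens
def pvFk (O E : List Int) (k j : Nat) : Int := (O.take j).sum + (E.take (k - j)).sum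

lemma pvStepUp (PO SO PE SE : List Int) (k j : Nat)
    (hab : PO.length + PE.length = k)
    (hcross1 : ∀ o ∈ PO, ∀ e ∈ SE, e ≤ o)
    (hj : j < PO.length) (hje : k - j ≤ PE.length + SE.length) :
    pvFk (PO ++ SO) (PE ++ SE) k j ≤ pvFk (PO ++ SO) (PE ++ SE) k (j + 1) := by
  have hOlen : j < (PO ++ SO).length := by simp only [List.length_append]; omega
  have hjk : j < k := by omega
  have hElen : k - j - 1 < (PE ++ SE).length := by simp only [List.length_append]; omega
  have hbj : PE.length ≤ k - j - 1 := by omega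
  have hSEidx : k - j - 1 - PE.length < SE.length := by
    simp only [List.length_append] at hElen; omega
  have hle : (PE ++ SE)[k-j-1]'hElen ≤ (PO ++ SO)[j]'hOlen := by
    rw [List.getElem_append_left hj, List.getElem_append_right hbj]
    exact hcross1 _ (List.getElem_mem _) _ (List.getElem_mem _)
  unfold pvFk
  rw [List.sum_take_succ _ j hOlen, show k - (j+1) = k - j - 1 by omega]
  have h2 : ((PE ++ SE).take (k-j)).sum = ((PE ++ SE).take (k-j-1)).sum + (PE ++ SE)[k-j-1]'hElen := by
    conv_lhs => rw [show k - j = (k - j - 1) + 1 by omega]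
    exact List.sum_take_succ _ _ hElen
  rw [h2]
  linarith

lemma pvStepDown (PO SO PE SE : List Int) (k i : Nat)
    (hab : PO.length + PE.length = k)
    (hcross2 : ∀ e ∈ PE, ∀ o ∈ SO, o ≤ e)
    (hi : PO.length ≤ i) (hiO : i < PO.length + SO.length) (hik : i < k) :
    pvFk (PO ++ SO) (PE ++ SE) k (i + 1) ≤ pvFk (PO ++ SO) (PE ++ SE) k i := by
  have hOlen : i < (PO ++ SO).length := by simp only [List.length_append]; omega
  have hEidx : k - i - 1 < PE.length := by omega
  have hElen : k - i - 1 < (PE ++ SE).length := by simp only [List.length_append]; omega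
  have hle : (PO ++ SO)[i]'hOlen ≤ (PE ++ SE)[k-i-1]'hElen := by
    rw [List.getElem_append_right hi, List.getElem_append_left hEidx]
    exact hcross2 _ (List.getElem_mem _) _ (List.getElem_mem _)
  unfold pvFk
  rw [List.sum_take_succ _ i hOlen, show k - (i+1) = k - i - 1 by omega]
  have h2 : ((PE ++ SE).take (k-i)).sum = ((PE ++ SE).take (k-i-1)).sum + (PE ++ SE)[k-i-1]'hElen := by
    conv_lhs => rw [show k - i = (k - i - 1) + 1 by omega]
    exact List.sum_take_succ _ _ hElen
  rw [h2]
  linarith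

lemma pvChainUp (PO SO PE SE : List Int) (k : Nat)
    (hab : PO.length + PE.length = k)
    (hcross1 : ∀ o ∈ PO, ∀ e ∈ SE, e ≤ o) :
    ∀ (d j : Nat), j + d + 1 = PO.length → k - j ≤ PE.length + SE.length →
    pvFk (PO ++ SO) (PE ++ SE) k j ≤ pvFk (PO ++ SO) (PE ++ SE) k (PO.length - 1) := by
  intro d
  induction d with
  | zero => intro j hj _; rw [show PO.length - 1 = j by omega]
  | succ d ih =>
    intro j hj hje
    refine le_trans (pvStepUp PO SO PE SE k j hab hcross1 (by omega) hje) ?_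
    exact ih (j + 1) (by omega) (by omega)

lemma pvChainDown (PO SO PE SE : List Int) (k : Nat)
    (hab : PO.length + PE.length = k)
    (hcross2 : ∀ e ∈ PE, ∀ o ∈ SO, o ≤ e) :
    ∀ (d j : Nat), j = PO.length + 1 + d → j ≤ PO.length + SO.length → j ≤ k →
    pvFk (PO ++ SO) (PE ++ SE) k j ≤ pvFk (PO ++ SO) (PE ++ SE) k (PO.length + 1) := by
  intro d
  induction d with
  | zero => intro j hj _ _; rw [show j = PO.length + 1 by omega]
  | succ d ih =>
    intro j hj hjO hjk
    have h1 : pvFk (PO ++ SO) (PE ++ SE) k j ≤ pvFk (PO ++ SO) (PE ++ SE) k (j - 1) := by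
      have := pvStepDown PO SO PE SE k (j - 1) hab hcross2 (by omega) (by omega) (by omega)
      rwa [show j - 1 + 1 = j by omega] at this
    exact le_trans h1 (ih (j - 1) (by omega) (by omega) (by omega))

-- endpoint values of f
lemma pvFkT1 (PO SO PE SE : List Int) (k : Nat) (hab : PO.length + PE.length = k)
    (hPO : PO ≠ []) (hSE : SE ≠ []) :
    pvFk (PO ++ SO) (PE ++ SE) k (PO.length - 1) =
      (PO.sum + PE.sum) - PO.getLastD 0 + SE.headD 0 := by
  have ha : 1 ≤ PO.length := List.length_pos_of_ne_nil hPO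
  have h1 : (PO ++ SO).take (PO.length - 1) = PO.dropLast := by
    rw [List.take_append_of_le_length (by omega), List.dropLast_eq_take]
  have h2 : PO.dropLast.sum = PO.sum - PO.getLastD 0 := by
    have h := congrArg List.sum (List.dropLast_append_getLast hPO)
    rw [List.getLastD_eq_getLast?, List.getLast?_eq_some_getLast hPO]
    simp only [List.sum_append, List.sum_cons, List.sum_nil, Option.getD_some] at h ⊢
    omega
  have h3 : (PE ++ SE).take (k - (PO.length - 1)) = PE ++ SE.take 1 := by
    rw [show k - (PO.length - 1) = PE.length + 1 by omega, List.take_append,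
      List.take_of_length_le (by omega), show PE.length + 1 - PE.length = 1 by omega]
  have h4 : (SE.take 1).sum = SE.headD 0 := by
    cases SE with
    | nil => exact absurd rfl hSE
    | cons h t => simp
  unfold pvFk
  rw [h1, h2, h3, List.sum_append, h4]
  ring

lemma pvFkT2 (PO SO PE SE : List Int) (k : Nat) (hab : PO.length + PE.length = k)
    (hPE : PE ≠ []) (hSO : SO ≠ []) :
    pvFk (PO ++ SO) (PE ++ SE) k (PO.length + 1) =
      (PO.sum + PE.sum) - PE.getLastD 0 + SO.headD 0 := by
  have hb : 1 ≤ PE.length := List.length_pos_of_ne_nil hPE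
  have h1 : (PO ++ SO).take (PO.length + 1) = PO ++ SO.take 1 := by
    rw [List.take_append, List.take_of_length_le (by omega),
      show PO.length + 1 - PO.length = 1 by omega]
  have h2 : (SO.take 1).sum = SO.headD 0 := by
    cases SO with
    | nil => exact absurd rfl hSO
    | cons h t => simp
  have h3 : (PE ++ SE).take (k - (PO.length + 1)) = PE.dropLast := by
    rw [show k - (PO.length + 1) = PE.length - 1 by omega,
      List.take_append_of_le_length (by omega), List.dropLast_eq_take]
  have h4 : PE.dropLast.sum = PE.sum - PE.getLastD 0 := by
    have h := congrArg List.sum (List.dropLast_append_getLast hPE)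
    rw [List.getLastD_eq_getLast?, List.getLast?_eq_some_getLast hPE]
    simp only [List.sum_append, List.sum_cons, List.sum_nil, Option.getD_some] at h ⊢
    omega
  unfold pvFk
  rw [h1, h3, h4, List.sum_append, h2]
  ring

-- pvT1/pvT2 vs the getLastD/headD formulas
lemma pvT1_eq (P S : List Int) (s : Int) (hPO : P.filter pvIsOdd ≠ []) (hSE : S.filter pvIsEven ≠ []) :
    pvT1 P S s = s - (P.filter pvIsOdd).getLastD 0 + (S.filter pvIsEven).headD 0 := by
  obtain ⟨o, ho⟩ := Option.isSome_iff_exists.mp (List.getLast?_isSome.mpr hPO)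
  obtain ⟨e, he⟩ := Option.isSome_iff_exists.mp (List.isSome_head?.mpr hSE)
  simp [pvT1, ho, he, List.getLastD_eq_getLast?, List.headD_eq_head?_getD]

lemma pvT2_eq (P S : List Int) (s : Int) (hPE : P.filter pvIsEven ≠ []) (hSO : S.filter pvIsOdd ≠ []) :
    pvT2 P S s = s - (P.filter pvIsEven).getLastD 0 + (S.filter pvIsOdd).headD 0 := by
  obtain ⟨y, hy⟩ := Option.isSome_iff_exists.mp (List.getLast?_isSome.mpr hPE)
  obtain ⟨o, ho⟩ := Option.isSome_iff_exists.mp (List.isSome_head?.mpr hSO)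
  simp [pvT2, hy, ho, List.getLastD_eq_getLast?, List.headD_eq_head?_getD]

lemma pvT1_zero (P S : List Int) (s : Int) (h : S.filter pvIsEven = []) : pvT1 P S s = 0 := by
  simp [pvT1, h]

lemma pvT2_zero (P S : List Int) (s : Int) (h : S.filter pvIsOdd = []) : pvT2 P S s = 0 := by
  simp [pvT2, h]

-- an odd-sum list contains an odd element
lemma pvPOne (P : List Int) (hs : ¬ PySem.Int.mod P.sum 2 = 0) : P.filter pvIsOdd ≠ [] := by
  intro hnil
  have h1 := pvSumPartition P
  have h2 := pvEvenSumParity (P.filter pvIsEven) (fun v hv => List.of_mem_filter hv)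
  rw [hnil] at h1
  simp at h1
  rw [pvModEmod] at hs
  omega

-- parity of the number of selected odds
lemma pvAOdd (P : List Int) (hs : ¬ PySem.Int.mod P.sum 2 = 0) :
    ((P.filter pvIsOdd).length : Int) % 2 = 1 := by
  have h1 := pvSumPartition P
  have h2 := pvEvenSumParity (P.filter pvIsEven) (fun v hv => List.of_mem_filter hv)
  have h3 := pvOddSumParity (P.filter pvIsOdd) (fun v hv => List.of_mem_filter hv)
  rw [pvModEmod] at hs
  omega

-- ---- the two characterization lemmas ----
lemma pvAeq (cards : List Int) (cnt : Int) (h0 : 0 ≤ cnt)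
    (hle : cnt ≤ (cards.length : Int) ∨ PySem.Int.mod cards.sum 2 = 0) :
    maxmiumScore cards cnt =
      if PySem.Int.mod (pvSVal cards cnt) 2 = 0 then pvSVal cards cnt else pvOddVal cards cnt := by
  obtain ⟨k, rfl⟩ : ∃ k : Nat, cnt = (k : Int) := ⟨cnt.toNat, (Int.toNat_of_nonneg h0).symm⟩
  simp only [maxmiumScore]
  set L := PySem.List.sorted cards (fun x => x) true with hL
  have hlen : L.length = cards.length := PySem.List.length_sorted cards (fun x => x) true
  have hsval : pvSVal cards (k : Int) = (L.take k).sum := by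
    simp only [pvSVal, pvL, ← hL, Int.toNat_natCast]
  have hoval : pvOddVal cards (k : Int) =
      (if (L.take k).filter pvIsEven = [] then pvT1 (L.take k) (L.drop k) ((L.take k).sum)
       else max (pvT1 (L.take k) (L.drop k) ((L.take k).sum)) (pvT2 (L.take k) (L.drop k) ((L.take k).sum))) := by
    simp only [pvOddVal, pvL, ← hL, Int.toNat_natCast]
  rw [hsval, hoval]
  by_cases hkle : k ≤ L.length
  case neg =>
    have heven : PySem.Int.mod cards.sum 2 = 0 := by
      rcases hle with h | h
      · exact absurd (show k ≤ L.length by rw [hlen]; exact_mod_cast h) hkle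
      · exact h
    have htk : L.take k = L := List.take_of_length_le (by omega)
    have hsum : L.sum = cards.sum := (PySem.List.sorted_perm cards (fun x => x) true).sum_eq
    simp only [PySem.List.slice_to_natCast, htk, hsum, if_pos heven]
  simp only [PySem.List.slice_to_natCast]
  by_cases hpar : PySem.Int.mod (L.take k).sum 2 = 0
  · simp only [if_pos hpar]
  · simp only [if_neg hpar]
    have hk1 : 1 ≤ k := by
      by_contra h
      have hzero : k = 0 := by omega
      subst hzero
      exact hpar (by simp only [List.take_zero, List.sum_nil]; decide)
    have hgx : PySem.List.pyGet? L ((k:Int) - 1) = some (L[k-1]'(by omega)) := by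
      rw [show ((k:Int) - 1) = ((k-1 : Nat) : Int) by omega, PySem.List.pyGet?_natCast,
        List.getElem?_eq_getElem (by omega)]
    have hsl : PySem.List.slice L (some (k:Int)) none = L.drop k :=
      PySem.List.slice_from_natCast L k
    have hrev : PySem.List.slice? L (some ((k:Int) - 1)) none (-1) = some ((L.take k).reverse) := by
      rw [show ((k:Int) - 1) = ((k-1 : Nat) : Int) by omega, pvSliceRev L (k-1) (by omega),
        show k - 1 + 1 = k by omega]
    rw [hgx, hsl, hrev]
    have hne : L.take k ≠ [] := by
      apply List.ne_nil_of_length_pos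
      simp only [List.length_take]
      omega
    have hlast : (L.take k).getLast hne = L[k-1]'(by omega) := by
      rw [List.getLast_eq_getElem, List.getElem_take]
      congr 1
      simp only [List.length_take]
      omega
    have hPO : (L.take k).filter pvIsOdd ≠ [] := pvPOne _ hpar
    rw [← hlast]
    exact pvAval (L.take k) (L.drop k) (L.take k).sum hne hPO

lemma pvBeq (cards : List Int) (cnt : Int) (h0 : 0 ≤ cnt)
    (hle : cnt ≤ (cards.length : Int) ∨ PySem.Int.mod cards.sum 2 = 0) :
    maxmiumScore_alt cards cnt =
      if PySem.Int.mod (pvSVal cards cnt) 2 = 0 then pvSVal cards cnt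
      else max 0 (pvOddVal cards cnt) := by
  obtain ⟨k, rfl⟩ : ∃ k : Nat, cnt = (k : Int) := ⟨cnt.toNat, (Int.toNat_of_nonneg h0).symm⟩
  simp only [maxmiumScore_alt]
  set L := PySem.List.sorted cards (fun x => x) true with hL
  have hlen : L.length = cards.length := PySem.List.length_sorted cards (fun x => x) true
  have hsval : pvSVal cards (k : Int) = (L.take k).sum := by
    simp only [pvSVal, pvL, ← hL, Int.toNat_natCast]
  have hoval : pvOddVal cards (k : Int) =
      (if (L.take k).filter pvIsEven = [] then pvT1 (L.take k) (L.drop k) ((L.take k).sum)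
       else max (pvT1 (L.take k) (L.drop k) ((L.take k).sum)) (pvT2 (L.take k) (L.drop k) ((L.take k).sum))) := by
    simp only [pvOddVal, pvL, ← hL, Int.toNat_natCast]
  rw [hsval, hoval]
  by_cases hkle : k ≤ L.length
  case neg =>
    have heven : PySem.Int.mod cards.sum 2 = 0 := by
      rcases hle with h | h
      · exact absurd (show k ≤ L.length by rw [hlen]; exact_mod_cast h) hkle
      · exact h
    have htk : L.take k = L := List.take_of_length_le (by omega)
    have hsum : L.sum = cards.sum := (PySem.List.sorted_perm cards (fun x => x) true).sum_eq
    simp only [PySem.List.slice_to_natCast, htk, hsum, if_pos heven]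
  simp only [PySem.List.slice_to_natCast]
  by_cases hpar : PySem.Int.mod (L.take k).sum 2 = 0
  · simp only [if_pos hpar]
  · simp only [if_neg hpar]
    set P := L.take k with hP
    set S := L.drop k with hS
    set PO := P.filter pvIsOdd with hPOd
    set PE := P.filter pvIsEven with hPEd
    set SO := S.filter pvIsOdd with hSOd
    set SE := S.filter pvIsEven with hSEd
    have hOsplit : L.filter pvIsOdd = PO ++ SO := by
      conv_lhs => rw [← List.take_append_drop k L]
      rw [List.filter_append]
    have hEsplit : L.filter pvIsEven = PE ++ SE := by
      conv_lhs => rw [← List.take_append_drop k L]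
      rw [List.filter_append]
    have hPlen : P.length = k := by
      simp only [hP, List.length_take]
      omega
    have hab : PO.length + PE.length = k := by
      have h := pvLenPartition P
      rw [← hPOd, ← hPEd] at h
      omega
    have haodd : ((PO.length : Int)) % 2 = 1 := pvAOdd P hpar
    have hsum : P.sum = PO.sum + PE.sum := pvSumPartition P
    have hpair : L.Pairwise (fun u v => v ≤ u) := PySem.List.sorted_pairwise_rev cards (fun x => x)
    have hPS : ∀ p ∈ P, ∀ q ∈ S, q ≤ p := by
      rw [← List.take_append_drop k L, List.pairwise_append] at hpair
      exact fun p hp q hq => hpair.2.2 p hp q hq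
    have hcross1 : ∀ o ∈ PO, ∀ e ∈ SE, e ≤ o := fun o ho e he =>
      hPS o (List.mem_of_mem_filter ho) e (List.mem_of_mem_filter he)
    have hcross2 : ∀ e ∈ PE, ∀ o ∈ SO, o ≤ e := fun e he o ho =>
      hPS e (List.mem_of_mem_filter he) o (List.mem_of_mem_filter ho)
    rw [hOsplit, hEsplit]
    set a := PO.length with ha
    set b := PE.length with hb
    set s := P.sum with hs
    -- the loop value at an in-range index kk = ↑j is pvFk
    have hval : ∀ (j : Nat), j ≤ (PO ++ SO).length → j ≤ k → k - j ≤ (PE ++ SE).length →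
        (PySem.List.pyGet? (0 :: pvPrefixLoop 0 (PO ++ SO)) (j : Int)).getD 0 +
        (PySem.List.pyGet? (0 :: pvPrefixLoop 0 (PE ++ SE)) ((k : Int) - (j : Int))).getD 0 =
          pvFk (PO ++ SO) (PE ++ SE) k j := by
      intro j hjO hjk hje
      have h1 : ((k : Int) - (j : Int)) = ((k - j : Nat) : Int) := by push_cast; omega
      rw [h1, PySem.List.pyGet?_natCast, PySem.List.pyGet?_natCast,
        pvPrefixGet _ j 0 (by simpa using hjO), pvPrefixGet _ (k - j) 0 (by simpa using hje)]
      simp [pvFk]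
    have hPOn : PO ≠ [] := pvPOne _ hpar
    have ha1 : 1 ≤ a := List.length_pos_of_ne_nil hPOn
    -- the two candidates are reachable loop values
    have ht1reach : SE ≠ [] → pvT1 P S s = pvFk (PO ++ SO) (PE ++ SE) k (a - 1) := by
      intro hSEn
      rw [pvT1_eq _ _ _ hPOn hSEn, pvFkT1 PO SO PE SE k hab hPOn hSEn, ← hsum]
    have ht2reach : PE ≠ [] → SO ≠ [] → pvT2 P S s = pvFk (PO ++ SO) (PE ++ SE) k (a + 1) := by
      intro hPEn hSOn
      rw [pvT2_eq _ _ _ hPEn hSOn, pvFkT2 PO SO PE SE k hab hPEn hSOn, ← hsum]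
    set AVal := (if PE = [] then pvT1 P S s else max (pvT1 P S s) (pvT2 P S s)) with hAVal
    have ht1le : pvT1 P S s ≤ AVal := by
      rw [hAVal]; split_ifs <;> simp
    have ht2le : PE ≠ [] → pvT2 P S s ≤ AVal := by
      intro h; rw [hAVal, if_neg h]; simp
    apply le_antisymm
    · -- every considered candidate is at most max 0 AVal
      apply pvFoldLe
        (fun kk => 0 ≤ (k : Int) - kk ∧ (k : Int) - kk ≤ (((PE ++ SE).length : Nat) : Int))
        (fun kk => (PySem.List.pyGet? (0 :: pvPrefixLoop 0 (PO ++ SO)) kk).getD 0 +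
          (PySem.List.pyGet? (0 :: pvPrefixLoop 0 (PE ++ SE)) ((k : Int) - kk)).getD 0)
        _ _ _ (le_max_left 0 _)
      intro kk hmem hcond
      obtain ⟨hkk0, hkklt, hdvd⟩ := (PySem.List.mem_pyRange_iff_of_pos (by norm_num) kk).mp hmem
      rw [sub_zero] at hdvd
      obtain ⟨j, rfl⟩ : ∃ j : Nat, kk = (j : Int) := ⟨kk.toNat, (Int.toNat_of_nonneg hkk0).symm⟩
      have hjO : j ≤ (PO ++ SO).length := by
        simp only [List.length_append] at hkklt ⊢
        omega
      have hjk : j ≤ k := by omega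
      have hje : k - j ≤ (PE ++ SE).length := by
        obtain ⟨hc1, hc2⟩ := hcond
        simp only [List.length_append] at hc2 ⊢
        omega
      rw [hval j hjO hjk hje]
      have hjeven : 2 ∣ (j : Int) := hdvd
      have hja : j ≠ a := by omega
      rcases Nat.lt_or_ge j a with hlt | hge
      · have hSEn : SE ≠ [] := by
          apply List.ne_nil_of_length_pos
          simp only [List.length_append] at hje
          omega
        refine le_trans (pvChainUp PO SO PE SE k hab hcross1 (a - 1 - j) j (by omega) (by simpa using hje)) ?_
        rw [← ht1reach hSEn]
        exact le_trans ht1le (le_max_right 0 _)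
      · have hgt : a < j := by omega
        have hPEn : PE ≠ [] := by
          apply List.ne_nil_of_length_pos
          omega
        have hSOn : SO ≠ [] := by
          apply List.ne_nil_of_length_pos
          simp only [List.length_append] at hjO
          omega
        refine le_trans (pvChainDown PO SO PE SE k hab hcross2 (j - (a + 1)) j (by omega)
          (by simpa [List.length_append] using hjO) hjk) ?_
        rw [← ht2reach hPEn hSOn]
        exact le_trans (ht2le hPEn) (le_max_right 0 _)
    · -- the loop reaches 0 and both candidates
      refine max_le (pvFoldGeInit _ _ _ _) ?_
      rw [hAVal]
      split_ifs with hPEe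
      · by_cases hSEn : SE = []
        · rw [pvT1_zero _ _ _ hSEn]
          exact pvFoldGeInit _ _ _ _
        · rw [ht1reach hSEn]
          have hm : ((a - 1 : Nat) : Int) ∈ PySem.List.pyRange 0 (((PO ++ SO).length : Nat) + 1 : Int) 2 := by
            refine (PySem.List.mem_pyRange_iff_of_pos (by norm_num) _).mpr ⟨by omega, ?_, ?_⟩
            · simp only [List.length_append]
              push_cast
              omega
            · rw [sub_zero]
              omega
          have hc : 0 ≤ (k : Int) - ((a - 1 : Nat) : Int) ∧
              (k : Int) - ((a - 1 : Nat) : Int) ≤ (((PE ++ SE).length : Nat) : Int) := by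
            have hSEl : 1 ≤ SE.length := List.length_pos_of_ne_nil hSEn
            simp only [List.length_append]
            push_cast
            omega
          refine le_trans (le_of_eq ?_) (pvFoldGeElem _ _ _ _ _ hm hc)
          rw [hval (a - 1) (by simp only [List.length_append]; omega) (by omega)
            (by have hSEl : 1 ≤ SE.length := List.length_pos_of_ne_nil hSEn
                simp only [List.length_append]; omega)]
      · refine max_le ?_ ?_
        case _ =>
                by_cases hSEn : SE = []
                · rw [pvT1_zero _ _ _ hSEn]
                  exact pvFoldGeInit _ _ _ _
                · rw [ht1reach hSEn]
                  have hm : ((a - 1 : Nat) : Int) ∈ PySem.List.pyRange 0 (((PO ++ SO).length : Nat) + 1 : Int) 2 := by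
                    refine (PySem.List.mem_pyRange_iff_of_pos (by norm_num) _).mpr ⟨by omega, ?_, ?_⟩
                    · simp only [List.length_append]
                      push_cast
                      omega
                    · rw [sub_zero]
                      omega
                  have hc : 0 ≤ (k : Int) - ((a - 1 : Nat) : Int) ∧
                      (k : Int) - ((a - 1 : Nat) : Int) ≤ (((PE ++ SE).length : Nat) : Int) := by
                    have hSEl : 1 ≤ SE.length := List.length_pos_of_ne_nil hSEn
                    simp only [List.length_append]
                    push_cast
                    omega
                  refine le_trans (le_of_eq ?_) (pvFoldGeElem _ _ _ _ _ hm hc)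
                  rw [hval (a - 1) (by simp only [List.length_append]; omega) (by omega)
                    (by have hSEl : 1 ≤ SE.length := List.length_pos_of_ne_nil hSEn
                        simp only [List.length_append]; omega)]
        case _ =>
          by_cases hSOn : SO = []
          · rw [pvT2_zero _ _ _ hSOn]
            exact pvFoldGeInit _ _ _ _
          · rw [ht2reach hPEe hSOn]
            have hSOl : 1 ≤ SO.length := List.length_pos_of_ne_nil hSOn
            have hbl : 1 ≤ b := List.length_pos_of_ne_nil hPEe
            have hm : ((a + 1 : Nat) : Int) ∈ PySem.List.pyRange 0 (((PO ++ SO).length : Nat) + 1 : Int) 2 := by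
              refine (PySem.List.mem_pyRange_iff_of_pos (by norm_num) _).mpr ⟨by omega, ?_, ?_⟩
              · simp only [List.length_append]
                push_cast
                omega
              · rw [sub_zero]
                omega
            have hc : 0 ≤ (k : Int) - ((a + 1 : Nat) : Int) ∧
                (k : Int) - ((a + 1 : Nat) : Int) ≤ (((PE ++ SE).length : Nat) : Int) := by
              simp only [List.length_append]
              push_cast
              omega
            refine le_trans (le_of_eq ?_) (pvFoldGeElem _ _ _ _ _ hm hc)
            rw [hval (a + 1) (by simp only [List.length_append]; omega) (by omega)
              (by simp only [List.length_append]; omega)]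

lemma pvIsEven_of_mod (q : Int) (h : PySem.Int.mod q 2 = 0) : pvIsEven q = true := by
  simp only [pvIsEven, h]; decide

lemma pvIsOdd_of_mod (q : Int) (h : PySem.Int.mod q 2 = 1) : pvIsOdd q = true := by
  simp only [pvIsOdd, h]; decide

lemma pvMemGetLastD (l : List Int) (h : l ≠ []) : l.getLastD 0 ∈ l := by
  rw [List.getLastD_eq_getLast?, List.getLast?_eq_some_getLast h]
  exact List.getLast_mem h

lemma pvMemHeadD (l : List Int) (h : l ≠ []) : l.headD 0 ∈ l := by
  cases l with
  | nil => exact absurd rfl h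
  | cons x t => simp

lemma pvLastMin (l : List Int) (hp : l.Pairwise (fun a b => b ≤ a)) :
    ∀ y ∈ l, l.getLastD 0 ≤ y := by
  intro y hy
  have hne : l ≠ [] := List.ne_nil_of_mem hy
  rw [List.getLastD_eq_getLast?, List.getLast?_eq_some_getLast hne, Option.getD_some]
  obtain ⟨i, hi, rfl⟩ := List.mem_iff_getElem.mp hy
  rw [List.getLast_eq_getElem]
  rcases Nat.lt_or_ge i (l.length - 1) with hlt | hge
  · exact List.pairwise_iff_getElem.mp hp i (l.length - 1) hi (by omega) hlt
  · have : i = l.length - 1 := by omega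
    subst this; exact le_refl _

lemma pvHeadMax (l : List Int) (hp : l.Pairwise (fun a b => b ≤ a)) :
    ∀ y ∈ l, y ≤ l.headD 0 := by
  intro y hy
  cases l with
  | nil => simp at hy
  | cons x t =>
    rcases List.mem_cons.mp hy with rfl | hyt
    · simp
    · simpa using (List.pairwise_cons.mp hp).1 y hyt

lemma pvOddMem (P : List Int) (p : Int) (hp : p ∈ P.filter pvIsOdd) :
    p ∈ P ∧ PySem.Int.mod p 2 = 1 := by
  obtain ⟨h1, h2⟩ := List.mem_filter.mp hp
  refine ⟨h1, ?_⟩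
  simp only [pvIsOdd, decide_eq_true_eq] at h2
  rcases pvMod2 p with h | h
  · exact absurd h h2
  · exact h

lemma pvEvenMem (P : List Int) (p : Int) (hp : p ∈ P.filter pvIsEven) :
    p ∈ P ∧ PySem.Int.mod p 2 = 0 := by
  obtain ⟨h1, h2⟩ := List.mem_filter.mp hp
  exact ⟨h1, by simpa [pvIsEven] using h2⟩

lemma pvDneg (cards : List Int) (cnt : Int)
    (hnd : ¬ D_maxmiumScore cards cnt) (hodd : ¬ PySem.Int.mod (pvSVal cards cnt) 2 = 0) :
    0 ≤ pvOddVal cards cnt := by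
  unfold D_maxmiumScore at hnd
  unfold pvOddVal pvSVal pvL at *
  simp only at hnd
  set L := PySem.List.sorted cards (fun x => x) true with hL
  set P := L.take cnt.toNat with hP
  set S := L.drop cnt.toNat with hS
  set s := P.sum with hs
  have hodd1 : PySem.Int.mod s 2 = 1 := by
    rcases pvMod2 s with h | h
    · exact absurd h hodd
    · exact h
  have hPOn : P.filter pvIsOdd ≠ [] := pvPOne _ hodd
  have hpair : L.Pairwise (fun u v => v ≤ u) := PySem.List.sorted_pairwise_rev cards (fun x => x)
  have hPpair : P.Pairwise (fun u v => v ≤ u) := List.Pairwise.sublist (List.take_sublist _ _) hpair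
  have hSpair : S.Pairwise (fun u v => v ≤ u) := List.Pairwise.sublist (List.drop_sublist _ _) hpair
  have hPOmin : ∀ y ∈ P.filter pvIsOdd, (P.filter pvIsOdd).getLastD 0 ≤ y :=
    pvLastMin _ (List.Pairwise.sublist List.filter_sublist hPpair)
  have hPEmin : ∀ y ∈ P.filter pvIsEven, (P.filter pvIsEven).getLastD 0 ≤ y :=
    pvLastMin _ (List.Pairwise.sublist List.filter_sublist hPpair)
  have hSEmax : ∀ y ∈ S.filter pvIsEven, y ≤ (S.filter pvIsEven).headD 0 :=
    pvHeadMax _ (List.Pairwise.sublist List.filter_sublist hSpair)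
  have hSOmax : ∀ y ∈ S.filter pvIsOdd, y ≤ (S.filter pvIsOdd).headD 0 :=
    pvHeadMax _ (List.Pairwise.sublist List.filter_sublist hSpair)
  by_contra hneg
  push_neg at hneg
  apply hnd
  refine ⟨hodd1, ?_⟩
  by_cases hPE : P.filter pvIsEven = []
  · rw [if_pos hPE] at hneg
    have hSE : S.filter pvIsEven ≠ [] := by
      intro h; rw [pvT1_zero _ _ _ h] at hneg; omega
    have ht1 : s - (P.filter pvIsOdd).getLastD 0 + (S.filter pvIsEven).headD 0 < 0 := by
      rw [← pvT1_eq _ _ _ hPOn hSE]; exact hneg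
    obtain ⟨hpmem, hpodd⟩ := pvOddMem P _ (pvMemGetLastD _ hPOn)
    obtain ⟨hqmem, hqeven⟩ := pvEvenMem S _ (pvMemHeadD _ hSE)
    have hPallodd : ∀ y ∈ P, PySem.Int.mod y 2 = 1 := by
      intro y hy
      rcases pvMod2 y with h | h
      · exact absurd (List.mem_filter.mpr ⟨hy, pvIsEven_of_mod y h⟩)
          (by rw [hPE]; simp)
      · exact h
    refine ⟨?_, ?_⟩
    · intro p hp
      have hp1 : PySem.Int.mod p 2 = 1 := hPallodd p hp
      exact ⟨_, hqmem, by omega⟩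
    · intro p hp q hq hpq
      have hp1 : PySem.Int.mod p 2 = 1 := hPallodd p hp
      have hq0 : PySem.Int.mod q 2 = 0 := by
        rcases pvMod2 q with h | h
        · exact h
        · omega
      have h1 : (P.filter pvIsOdd).getLastD 0 ≤ p :=
        hPOmin p (List.mem_filter.mpr ⟨hp, pvIsOdd_of_mod p hp1⟩)
      have h2 : q ≤ (S.filter pvIsEven).headD 0 :=
        hSEmax q (List.mem_filter.mpr ⟨hq, pvIsEven_of_mod q hq0⟩)
      omega
  · rw [if_neg hPE] at hneg
    have ht1m : pvT1 P S s < 0 := lt_of_le_of_lt (le_max_left _ _) hneg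
    have ht2m : pvT2 P S s < 0 := lt_of_le_of_lt (le_max_right _ _) hneg
    have hSE : S.filter pvIsEven ≠ [] := by
      intro h; rw [pvT1_zero _ _ _ h] at ht1m; omega
    have hSO : S.filter pvIsOdd ≠ [] := by
      intro h; rw [pvT2_zero _ _ _ h] at ht2m; omega
    have ht1 : s - (P.filter pvIsOdd).getLastD 0 + (S.filter pvIsEven).headD 0 < 0 := by
      rw [← pvT1_eq _ _ _ hPOn hSE]; exact ht1m
    have ht2 : s - (P.filter pvIsEven).getLastD 0 + (S.filter pvIsOdd).headD 0 < 0 := by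
      rw [← pvT2_eq _ _ _ hPE hSO]; exact ht2m
    obtain ⟨hp1mem, hp1odd⟩ := pvOddMem P _ (pvMemGetLastD _ hPOn)
    obtain ⟨hq1mem, hq1even⟩ := pvEvenMem S _ (pvMemHeadD _ hSE)
    obtain ⟨hp2mem, hp2even⟩ := pvEvenMem P _ (pvMemGetLastD _ hPE)
    obtain ⟨hq2mem, hq2odd⟩ := pvOddMem S _ (pvMemHeadD _ hSO)
    refine ⟨?_, ?_⟩
    · intro p hp
      rcases pvMod2 p with hp0 | hp1
      · exact ⟨_, hq2mem, by omega⟩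
      · exact ⟨_, hq1mem, by omega⟩
    · intro p hp q hq hpq
      rcases pvMod2 p with hp0 | hp1
      · have hq1 : PySem.Int.mod q 2 = 1 := by
          rcases pvMod2 q with h | h
          · omega
          · exact h
        have h1 : (P.filter pvIsEven).getLastD 0 ≤ p :=
          hPEmin p (List.mem_filter.mpr ⟨hp, pvIsEven_of_mod p hp0⟩)
        have h2 : q ≤ (S.filter pvIsOdd).headD 0 :=
          hSOmax q (List.mem_filter.mpr ⟨hq, pvIsOdd_of_mod q hq1⟩)
        omega
      · have hq0 : PySem.Int.mod q 2 = 0 := by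
          rcases pvMod2 q with h | h
          · exact h
          · omega
        have h1 : (P.filter pvIsOdd).getLastD 0 ≤ p :=
          hPOmin p (List.mem_filter.mpr ⟨hp, pvIsOdd_of_mod p hp1⟩)
        have h2 : q ≤ (S.filter pvIsEven).headD 0 :=
          hSEmax q (List.mem_filter.mpr ⟨hq, pvIsEven_of_mod q hq0⟩)
        omega

lemma pvDpos (cards : List Int) (cnt : Int) (hd : D_maxmiumScore cards cnt) :
    ¬ PySem.Int.mod (pvSVal cards cnt) 2 = 0 ∧ pvOddVal cards cnt < 0 := by
  unfold D_maxmiumScore at hd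
  unfold pvOddVal pvSVal pvL
  simp only at hd
  set L := PySem.List.sorted cards (fun x => x) true with hL
  set P := L.take cnt.toNat with hP
  set S := L.drop cnt.toNat with hS
  set s := P.sum with hs
  obtain ⟨hodd1, hex, hall⟩ := hd
  have hodd : ¬ PySem.Int.mod s 2 = 0 := by omega
  have hPOn : P.filter pvIsOdd ≠ [] := pvPOne _ hodd
  obtain ⟨hpmem, hpodd⟩ := pvOddMem P _ (pvMemGetLastD _ hPOn)
  have ht1 : S.filter pvIsEven ≠ [] → pvT1 P S s < 0 := by
    intro hSE
    obtain ⟨hqmem, hqeven⟩ := pvEvenMem S _ (pvMemHeadD _ hSE)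
    rw [pvT1_eq _ _ _ hPOn hSE]
    exact hall _ hpmem _ hqmem (by omega)
  have ht2 : P.filter pvIsEven ≠ [] → S.filter pvIsOdd ≠ [] → pvT2 P S s < 0 := by
    intro hPE hSO
    obtain ⟨hp2mem, hp2even⟩ := pvEvenMem P _ (pvMemGetLastD _ hPE)
    obtain ⟨hq2mem, hq2odd⟩ := pvOddMem S _ (pvMemHeadD _ hSO)
    rw [pvT2_eq _ _ _ hPE hSO]
    exact hall _ hp2mem _ hq2mem (by omega)
  refine ⟨hodd, ?_⟩
  have hSE : S.filter pvIsEven ≠ [] := by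
    obtain ⟨q, hq, hpq⟩ := hex _ hpmem
    have hq0 : PySem.Int.mod q 2 = 0 := by
      rcases pvMod2 q with h | h
      · exact h
      · omega
    exact List.ne_nil_of_mem (List.mem_filter.mpr ⟨hq, pvIsEven_of_mod q hq0⟩)
  by_cases hPE : P.filter pvIsEven = []
  · rw [if_pos hPE]
    exact ht1 hSE
  · rw [if_neg hPE]
    obtain ⟨p2, hp2⟩ := List.exists_mem_of_ne_nil _ hPE
    obtain ⟨hp2P, hp2even⟩ := pvEvenMem P p2 hp2
    have hSO : S.filter pvIsOdd ≠ [] := by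
      obtain ⟨q, hq, hpq⟩ := hex _ hp2P
      have hq1 : PySem.Int.mod q 2 = 1 := by
        rcases pvMod2 q with h | h
        · omega
        · exact h
      exact List.ne_nil_of_mem (List.mem_filter.mpr ⟨hq, pvIsOdd_of_mod q hq1⟩)
    exact max_lt (ht1 hSE) (ht2 hPE hSO)

-- on an even (sorted-)prefix sum both programs return it in their first branch
lemma pvEvenEq (cards : List Int) (cnt : Int)
    (heven : PySem.Int.mod (PySem.List.slice (PySem.List.sorted cards (fun x => x) true)
      none (some cnt)).sum 2 = 0) :
    maxmiumScore cards cnt = maxmiumScore_alt cards cnt := by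
  simp only [maxmiumScore, maxmiumScore_alt, if_pos heven]

-- ===== VERDICT (by name: the statements are the Claim_ definitions above) =====
theorem maxmiumScore_spec : Claim_unchanged_maxmiumScore := by
  intro cards cnt _ hpre
  unfold Spec_maxmiumScore
  intro hnd
  obtain ⟨hp1, hp2⟩ := hpre
  by_cases hc : 0 ≤ cnt
  · rw [pvAeq cards cnt hc hp1, pvBeq cards cnt hc hp1]
    split_ifs with h
    · rfl
    · exact (max_eq_right (pvDneg cards cnt hnd h)).symm
  · rcases hp2 with h | h
    · exact absurd h hc
    · exact pvEvenEq cards cnt h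

theorem maxmiumScore_changed : Claim_changed_maxmiumScore := by
  unfold Claim_changed_maxmiumScore; decide

theorem maxmiumScore_tight : Claim_exact_maxmiumScore := by
  intro cards cnt _ hpre hd
  have hc : 0 ≤ cnt := by
    by_contra hneg
    obtain ⟨h1, -, -⟩ := hd
    rw [show cnt.toNat = 0 by omega] at h1
    simp at h1
  obtain ⟨hodd, hneg⟩ := pvDpos cards cnt hd
  rw [pvAeq cards cnt hc hpre.1, pvBeq cards cnt hc hpre.1, if_neg hodd, if_neg hodd]
  have := le_max_left 0 (pvOddVal cards cnt)
  omega
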